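-- pv_equiv track=rewrite | github.com/andrewdema/ITEA | HW/hw_4/hw_4_1.py | clear_word
-- ===== SOURCE A (Python) =====
-- import string
--
-- def clear_word(word, filterstr):
--     prav_simv = string.ascii_letters
--     new_word = word
--     for i in new_word:
--         if i in filterstr:
--             new_word = new_word.replace(i, '')
--     for i in new_word:
--         if i not in prav_simv:
--             raise ValueError('The word has a outside symbol {}, index - {}'.format(i, word.index(i)))
--     result = new_word
--     return result
-- ===== SOURCE B (Python) =====
-- import string
--
-- def clear_word(word, filterstr):
--     result = []
--     for ch in word:
--         if ch in filterstr:
--             continue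
--         if ch not in string.ascii_letters:
--             raise ValueError('The word has a outside symbol {}, index - {}'.format(ch, word.index(ch)))
--         result.append(ch)
--     return ''.join(result)
-- ===== Notes on version B (the rewrite author's own statement) =====
-- stated objective: faster
-- what changed: A first strips filtered characters by repeatedly calling str.replace (a full rescan-and-rebuild of the string per character) and then validates in a second loop; B is a single fused pass that skips filtered characters, validates the rest, and appends to a list joined once at the end.
import Mathlib
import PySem

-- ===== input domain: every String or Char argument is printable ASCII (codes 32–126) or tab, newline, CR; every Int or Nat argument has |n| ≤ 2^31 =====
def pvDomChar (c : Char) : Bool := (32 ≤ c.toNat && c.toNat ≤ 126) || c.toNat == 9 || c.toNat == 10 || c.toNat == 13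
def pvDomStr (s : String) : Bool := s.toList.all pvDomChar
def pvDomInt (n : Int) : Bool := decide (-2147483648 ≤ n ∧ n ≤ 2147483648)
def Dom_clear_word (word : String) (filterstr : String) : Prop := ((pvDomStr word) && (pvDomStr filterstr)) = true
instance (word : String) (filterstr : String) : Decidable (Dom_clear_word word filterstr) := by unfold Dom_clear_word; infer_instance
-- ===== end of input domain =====

-- B fuses A's two loops (filter, then validate) into one pass that builds the output; return values proved equal on Pre_ (where neither raises).

-- ===== PORT A =====
-- 'for i in new_word' iterates the string new_word referred to at loop entry, i.e. word;
-- new_word.replace(i, '') removes every occurrence of i (PySem.Chars.replace).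
def clear_word (word : String) (filterstr : String) : String :=
  let new_word := word.toList.foldl
    (fun nw i => if i ∈ filterstr.toList then PySem.Chars.replace nw [i] [] else nw)
    word.toList
  -- second loop: 'for i in new_word: if i not in prav_simv: raise ValueError(...)'
  -- only raises (those inputs are excluded by Pre_clear_word) and never changes new_word
  String.mk new_word

-- ===== PORT B =====
def clear_word_alt (word : String) (filterstr : String) : String :=
  String.mk (word.toList.foldl
    (fun res ch =>
      if ch ∈ filterstr.toList then res   -- continue
      -- 'if ch not in string.ascii_letters: raise ValueError(...)' — excluded by Pre_clear_word
      else res ++ [ch])                   -- result.append(ch)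
    [])

-- ===== PRECONDITION & SPEC =====
-- Pre_ excludes exactly the inputs on which A (and B) raise ValueError: a character of word
-- that is neither filtered out nor an ASCII letter.
-- (c is in string.ascii_letters ↔ 'a' ≤ c ≤ 'z' or 'A' ≤ c ≤ 'Z')
def Pre_clear_word (word : String) (filterstr : String) : Prop :=
  (word.toList.all (fun c =>
    filterstr.toList.contains c || ('a' ≤ c && c ≤ 'z') || ('A' ≤ c && c ≤ 'Z'))) = true
instance (word : String) (filterstr : String) : Decidable (Pre_clear_word word filterstr) := by
  unfold Pre_clear_word; infer_instance
def pvWitness_clear_word : String × String := ("Hi, there", ", ")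

def Spec_clear_word (word : String) (filterstr : String) (out : String) : Prop := out = clear_word_alt word filterstr
instance (word : String) (filterstr : String) (out : String) : Decidable (Spec_clear_word word filterstr out) := by unfold Spec_clear_word; infer_instance

-- ===== CLAIM (what is proved, stated in full; the proofs are below) =====
def Claim_equal_clear_word : Prop := ∀ (word : String) (filterstr : String), Dom_clear_word word filterstr → Pre_clear_word word filterstr → Spec_clear_word word filterstr (clear_word word filterstr)

-- ===== LEMMAS AND PROOFS =====

-- replace with a single-char pattern and empty replacement is filter
lemma replace_go_single (c : Char) :
    ∀ (fuel : Nat) (l acc : List Char), l.length ≤ fuel →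
      PySem.Chars.replace.go [c] [] fuel l acc = acc.reverse ++ l.filter (· ≠ c) := by
  intro fuel
  induction fuel with
  | zero =>
    intro l acc h
    have : l = [] := List.eq_nil_of_length_eq_zero (Nat.le_zero.mp h)
    subst this; simp [PySem.Chars.replace.go]
  | succ n ih =>
    intro l acc h
    cases l with
    | nil => simp [PySem.Chars.replace.go]
    | cons a t =>
      by_cases hac : a = c
      · subst hac
        have hpre : List.isPrefixOf [a] (a :: t) = true := by simp [List.isPrefixOf]
        rw [PySem.Chars.replace.go, if_pos hpre]
        simp only [List.length_cons] at h
        simpa using ih t acc (Nat.le_of_succ_le_succ h)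
      · have hpre : List.isPrefixOf [c] (a :: t) = false := by
          simp [List.isPrefixOf]; exact fun hh => absurd hh.symm hac
        rw [PySem.Chars.replace.go, if_neg (by simp [hpre])]
        simp only [List.length_cons] at h
        rw [ih t (a :: acc) (Nat.le_of_succ_le_succ h)]
        simp [hac]

lemma replace_single (c : Char) (l : List Char) :
    PySem.Chars.replace l [c] [] = l.filter (· ≠ c) := by
  rw [PySem.Chars.replace, if_neg (by simp)]
  simpa using replace_go_single c l.length l [] le_rfl

-- A's first loop: sequentially deleting each filtered character of l from s
lemma a_loop_filter (fs : List Char) :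
    ∀ (l s : List Char),
      l.foldl (fun nw i => if i ∈ fs then PySem.Chars.replace nw [i] [] else nw) s
        = s.filter (fun c => decide (¬ (c ∈ fs ∧ c ∈ l))) := by
  intro l
  induction l with
  | nil => intro s; simp
  | cons a t ih =>
    intro s
    simp only [List.foldl_cons]
    by_cases ha : a ∈ fs
    · rw [if_pos ha, replace_single, ih, List.filter_filter]
      apply List.filter_congr
      intro c _
      by_cases hfs : c ∈ fs
      · by_cases hca : c = a
        · subst hca; simp [ha]
        · simp [hca, hfs]
      · have : c ≠ a := fun h => hfs (h ▸ ha)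
        simp [hfs, this]
    · rw [if_neg ha, ih]
      apply List.filter_congr
      intro c _
      by_cases hfs : c ∈ fs
      · have : c ≠ a := fun h => ha (h ▸ hfs)
        simp [hfs, this]
      · simp [hfs]

-- ===== VERDICT (by name: the statement is the Claim_ definition above) =====
theorem clear_word_spec : Claim_equal_clear_word := by
  intro word filterstr _ _
  unfold Spec_clear_word clear_word clear_word_alt
  show String.mk (word.toList.foldl
      (fun nw i => if i ∈ filterstr.toList then PySem.Chars.replace nw [i] [] else nw)
      word.toList) = _
  rw [a_loop_filter]
  rw [show (fun (res : List Char) ch => if ch ∈ filterstr.toList then res else res ++ [ch])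
        = (fun (res : List Char) ch => if ch ∉ filterstr.toList then res ++ [ch] else res) from by
      funext res ch; rw [ite_not]]
  rw [PySem.List.foldl_append_ite_eq_filter]
  apply congrArg String.mk
  apply List.filter_congr
  intro c hc
  by_cases hfs : c ∈ filterstr.toList
  · simp [hfs, hc]
  · simp [hfs, hc]
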